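-- pv_equiv track=rewrite | github.com/zhangcheng1006/Kernel_Method_Data_Challenge | kernels.py | substring_kernel
-- ===== SOURCE A (Python) =====
-- def within_gap(x, y, m=5):
--     '''Check if two strings are within gap of size m. Utilised in substring kernel
--     '''
--     l = len(x)
--     for i in range(m):
--         sub_x = x[i:l-m+i+1]
--         for j in range(m):
--             sub_y = y[j:l-m+j+1]
--             if sub_x == sub_y:
--                 return True
--     return False
--
-- def substring_kernel(x, y, kmer=13, m=5):
--     '''Implementation of substring kernel
--     '''
--     l = len(x)
--     substring_dict = {}
--     for i in range(l-kmer):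
--         sub_x = x[i:i+kmer]
--         sub_y = y[i:i+kmer]
--
--         if substring_dict.get(sub_x) is None:
--             substring_dict[sub_x] = [0, 0]
--         if substring_dict.get(sub_y) is None:
--             substring_dict[sub_y] = [0, 0]
--
--         for key in substring_dict.keys():
--             if within_gap(key, sub_x):
--                 substring_dict[key][0] += 1
--             if within_gap(key, sub_y):
--                 substring_dict[key][1] += 1
--
--     res = 0
--     for key, value in substring_dict.items():
--         res += value[0] * value[1]
--     return res
-- ===== SOURCE B (Python) =====
-- def _windows5(key):
--     lk = len(key)
--     return {key[a:lk - 4 + a] for a in range(5)}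
--
--
-- def _gap5(wk, lk, s):
--     return any(s[b:lk - 4 + b] in wk for b in range(5))
--
--
-- def substring_kernel(x, y, kmer=13, m=5):
--     """Streaming substring kernel (gap size 5): the first time a window string
--     appears in either stream, count its gapped matches over the rest of both
--     streams and accumulate the product of the two counts."""
--     n = len(x) - kmer
--     subs_x = [x[i:i + kmer] for i in range(n)]
--     subs_y = [y[i:i + kmer] for i in range(n)]
--     seen = set()
--     res = 0
--     for i, (sx, sy) in enumerate(zip(subs_x, subs_y)):
--         for key in (sx, sy):
--             if key not in seen:
--                 seen.add(key)
--                 lk = len(key)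
--                 wk = _windows5(key)
--                 cx = sum(1 for s in subs_x[i:] if _gap5(wk, lk, s))
--                 cy = sum(1 for s in subs_y[i:] if _gap5(wk, lk, s))
--                 res += cx * cy
--     return res
-- ===== Notes on version B (the rewrite author's own statement) =====
-- stated objective: alternative
-- what changed: A grows a dict of per-key counter pairs and rescans every known key inside the main loop with a doubly-nested 5x5 window comparison; B streams once over the window pairs and, the first time a string appears, counts its gapped matches over the remaining streams using a precomputed per-key window set with set-membership tests, accumulating the product.
import Mathlib
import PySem

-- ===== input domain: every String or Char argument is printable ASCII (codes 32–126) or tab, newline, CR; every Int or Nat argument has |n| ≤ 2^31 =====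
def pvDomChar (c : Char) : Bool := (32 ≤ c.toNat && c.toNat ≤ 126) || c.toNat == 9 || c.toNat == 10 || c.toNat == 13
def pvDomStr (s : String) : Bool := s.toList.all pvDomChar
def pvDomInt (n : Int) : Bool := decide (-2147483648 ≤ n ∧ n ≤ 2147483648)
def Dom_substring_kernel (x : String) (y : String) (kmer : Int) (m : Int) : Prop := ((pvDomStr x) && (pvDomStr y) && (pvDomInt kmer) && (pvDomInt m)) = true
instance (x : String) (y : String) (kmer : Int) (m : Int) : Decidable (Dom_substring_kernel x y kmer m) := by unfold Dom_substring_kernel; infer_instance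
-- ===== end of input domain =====

-- B is a streaming rewrite of A's incremental dict-of-counters kernel: when a window string
-- first appears it counts its gapped matches over the remaining streams (objective: alternative).

-- ===== PORT A =====
-- within_gap(x, y, m=5): 'for … for …: if …: return True' ported as nested .any
def within_gap (x : String) (y : String) (m : Int) : Bool :=
  let l : Int := PySem.Str.len x
  (PySem.List.pyRange 0 m).any (fun i =>
    let sub_x := PySem.Str.slice x (some i) (some (l - m + i + 1))
    (PySem.List.pyRange 0 m).any (fun j =>
      let sub_y := PySem.Str.slice y (some j) (some (l - m + j + 1))
      sub_x == sub_y))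

-- substring_kernel: the Python dict value [0, 0] (a two-counter list, only ever indexed
-- at 0 and 1) is ported as the pair Int × Int.  A calls within_gap with its DEFAULT
-- gap m=5 everywhere, so substring_kernel's own m parameter is never used.
def substring_kernel (x : String) (y : String) (kmer : Int) (m : Int) : Int :=
  let l : Int := PySem.Str.len x
  let d : PySem.Dict String (Int × Int) :=
    (PySem.List.pyRange 0 (l - kmer)).foldl (fun d i =>
      let sub_x := PySem.Str.slice x (some i) (some (i + kmer))
      let sub_y := PySem.Str.slice y (some i) (some (i + kmer))
      let d := if (d.get? sub_x).isNone then d.insert sub_x (0, 0) else d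
      let d := if (d.get? sub_y).isNone then d.insert sub_y (0, 0) else d
      d.keys.foldl (fun d key =>
        let d' := if within_gap key sub_x 5 then d.modify key (0, 0) (fun v => (v.1 + 1, v.2)) else d
        if within_gap key sub_y 5 then d'.modify key (0, 0) (fun v => (v.1, v.2 + 1)) else d') d)
      PySem.Dict.empty
  d.items.foldl (fun res kv => res + kv.2.1 * kv.2.2) 0

-- ===== PORT B =====
-- _windows5(key): the gap-5 comparison windows of key, as a set
def windows5 (key : String) : PySem.Set String :=
  let lk : Int := PySem.Str.len key
  PySem.Set.ofList ((PySem.List.pyRange 0 5).map (fun a => PySem.Str.slice key (some a) (some (lk - 4 + a))))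

-- _gap5(wk, lk, s): is some gap-5 window of s (with key's length lk) in key's window set wk?
def gap5 (wk : PySem.Set String) (lk : Int) (s : String) : Bool :=
  (PySem.List.pyRange 0 5).any (fun b => PySem.Set.contains wk (PySem.Str.slice s (some b) (some (lk - 4 + b))))

-- the body of Source B's 'for key in (sx, sy)' loop, applied once per key
def altHandle (subs_x subs_y : List String) (i : Int) (st : PySem.Set String × Int) (key : String) : PySem.Set String × Int :=
  if PySem.Set.contains st.1 key then st
  else
    let lk : Int := PySem.Str.len key
    let wk := windows5 key
    let cx : Int := (PySem.List.slice subs_x (some i) none).foldl (fun c s => if gap5 wk lk s then c + 1 else c) 0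
    let cy : Int := (PySem.List.slice subs_y (some i) none).foldl (fun c s => if gap5 wk lk s then c + 1 else c) 0
    (PySem.Set.add st.1 key, st.2 + cx * cy)

def substring_kernel_alt (x : String) (y : String) (kmer : Int) (m : Int) : Int :=
  let n : Int := PySem.Str.len x - kmer
  let subs_x := (PySem.List.pyRange 0 n).map (fun i => PySem.Str.slice x (some i) (some (i + kmer)))
  let subs_y := (PySem.List.pyRange 0 n).map (fun i => PySem.Str.slice y (some i) (some (i + kmer)))
  let st := (PySem.List.enumerate (subs_x.zip subs_y)).foldl
      (fun st p => altHandle subs_x subs_y p.1 (altHandle subs_x subs_y p.1 st p.2.1) p.2.2)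
      (PySem.Set.ofList [], 0)
  st.2

-- ===== PRECONDITION & SPEC =====
def Spec_substring_kernel (x : String) (y : String) (kmer : Int) (m : Int) (out : Int) : Prop := out = substring_kernel_alt x y kmer m
instance (x : String) (y : String) (kmer : Int) (m : Int) (out : Int) : Decidable (Spec_substring_kernel x y kmer m out) := by unfold Spec_substring_kernel; infer_instance

-- ===== CLAIM (what is proved, stated in full; the proofs are below) =====
def Claim_equal_substring_kernel : Prop := ∀ (x : String) (y : String) (kmer : Int) (m : Int), Dom_substring_kernel x y kmer m → Spec_substring_kernel x y kmer m (substring_kernel x y kmer m)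

-- ===== LEMMAS AND PROOFS =====

def pvGapB (key s : String) : Bool := gap5 (windows5 key) (PySem.Str.len key) s

theorem pvGapEq (key s : String) : within_gap key s 5 = pvGapB key s := by
  unfold within_gap pvGapB gap5 windows5
  have harith : ∀ i : Int, PySem.Str.len key - 5 + i + 1 = PySem.Str.len key - 4 + i :=
    fun i => by ring
  simp only [harith]
  rw [Bool.eq_iff_iff]
  simp only [List.any_eq_true, beq_iff_eq, PySem.Set.contains_iff, PySem.Set.mem_ofList,
    List.mem_map]
  constructor
  · rintro ⟨i, hi, j, hj, heq⟩
    exact ⟨j, hj, i, hi, heq⟩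
  · rintro ⟨b, hb, a, ha, heq⟩
    exact ⟨a, ha, b, hb, heq⟩

def pvSub (s : String) (kmer : Int) (i : Int) : String :=
  PySem.Str.slice s (some i) (some (i + kmer))

def pvInner (sub_x sub_y : String) (d : PySem.Dict String (Int × Int)) (key : String) : PySem.Dict String (Int × Int) :=
  let d' := if within_gap key sub_x 5 then d.modify key (0, 0) (fun v => (v.1 + 1, v.2)) else d
  if within_gap key sub_y 5 then d'.modify key (0, 0) (fun v => (v.1, v.2 + 1)) else d'

def pvUpd (sub_x sub_y key : String) (v : Int × Int) : Int × Int :=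
  ((if within_gap key sub_x 5 then v.1 + 1 else v.1),
   (if within_gap key sub_y 5 then v.2 + 1 else v.2))

theorem pvContains_iff {ν : Type} (d : PySem.Dict String ν) (k : String) :
    d.contains k = true ↔ k ∈ d.keys := by
  rw [PySem.Dict.contains_eq_decide_mem_keys]; simp

theorem pvGet?_isSome {ν : Type} (d : PySem.Dict String ν) (k : String) (h : k ∈ d.keys) :
    ∃ v, d.get? k = some v := by
  rcases hv : d.get? k with _ | v
  · exact absurd ((PySem.Dict.get?_eq_none_iff_not_mem_keys d k).mp hv) (by simpa using h)
  · exact ⟨v, rfl⟩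

theorem pvModify_eq {ν : Type} (d : PySem.Dict String ν) (k : String) (d0 : ν) (f : ν → ν) :
    d.modify k d0 f = d.insert k (f ((d.get? k).getD d0)) := rfl

theorem pvIns1_get? {ν : Type} (d : PySem.Dict String ν) (sx : String) (v : ν) (k : String) :
    (if d.contains sx then d else d.insert sx v).get? k
      = if k ∈ d.keys then d.get? k else if k = sx then some v else none := by
  by_cases hc : d.contains sx = true
  · simp only [hc, if_true]
    by_cases hk : k ∈ d.keys
    · simp [hk]
    · rw [if_neg hk]
      by_cases hks : k = sx
      · subst hks; exact absurd ((pvContains_iff d k).mp hc) hk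
      · rw [if_neg hks, (PySem.Dict.get?_eq_none_iff_not_mem_keys d k).mpr hk]
  · rw [if_neg hc]
    have hsx : sx ∉ d.keys := fun h => hc ((pvContains_iff d sx).mpr h)
    by_cases hks : k = sx
    · subst hks
      rw [PySem.Dict.get?_insert_self, if_neg hsx, if_pos rfl]
    · rw [PySem.Dict.get?_insert_of_ne d v hks]
      by_cases hk : k ∈ d.keys
      · rw [if_pos hk]
      · rw [if_neg hk, if_neg hks, (PySem.Dict.get?_eq_none_iff_not_mem_keys d k).mpr hk]

theorem pvIns1_keys {ν : Type} (d : PySem.Dict String ν) (sx : String) (v : ν) :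
    (if d.contains sx then d else d.insert sx v).keys = PySem.Set.add d.keys sx := by
  by_cases hc : d.contains sx = true
  · rw [if_pos hc, PySem.Set.add_of_mem ((pvContains_iff d sx).mp hc)]
  · have hsx : sx ∉ d.keys := fun h => hc ((pvContains_iff d sx).mpr h)
    rw [if_neg hc, PySem.Set.add_of_not_mem hsx]
    simp only [PySem.Dict.keys, PySem.Dict.items_insert_of_not_contains d v (by simpa using hc)]
    simp

theorem pvInner_keys (sub_x sub_y : String) (d : PySem.Dict String (Int × Int)) (key : String)
    (h : key ∈ d.keys) : (pvInner sub_x sub_y d key).keys = d.keys := by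
  unfold pvInner
  have hkeys : ∀ (d' : PySem.Dict String (Int × Int)), key ∈ d'.keys →
      ∀ f, (d'.modify key (0, 0) f).keys = d'.keys := by
    intro d' h' f
    rw [PySem.Dict.keys_modify, PySem.Dict.keys_insert_of_contains _ _ ((pvContains_iff d' key).mpr h')]
  have hm1 : ∀ f, key ∈ (d.modify key (0, 0) f).keys := fun f => by rw [hkeys d h]; exact h
  split_ifs with h1 h2 h3
  · rw [hkeys _ (hm1 _), hkeys d h]
  · rw [hkeys d h]
  · rw [hkeys d h]
  · rfl

theorem pvInner_get?_self (sub_x sub_y : String) (d : PySem.Dict String (Int × Int)) (key : String)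
    (h : key ∈ d.keys) :
    (pvInner sub_x sub_y d key).get? key = (d.get? key).map (pvUpd sub_x sub_y key) := by
  obtain ⟨v, hv⟩ := pvGet?_isSome d key h
  have hmod : ∀ (d' : PySem.Dict String (Int × Int)) (w : Int × Int) (f : Int × Int → Int × Int),
      d'.get? key = some w → (d'.modify key (0, 0) f).get? key = some (f w) := by
    intro d' w f hw
    rw [pvModify_eq, hw]
    exact PySem.Dict.get?_insert_self d' key _
  unfold pvInner pvUpd
  split_ifs with h1 h2 h3
  · rw [hmod _ _ _ (hmod _ _ _ hv), hv]; simp [h1, h2]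
  · rw [hmod _ _ _ hv, hv]; simp [h1, h2]
  · rw [hmod _ _ _ hv, hv]; simp [h1, h3]
  · rw [hv]; simp [h1, h3]

theorem pvInner_get?_ne (sub_x sub_y : String) (d : PySem.Dict String (Int × Int)) (key k : String)
    (hne : k ≠ key) : (pvInner sub_x sub_y d key).get? k = d.get? k := by
  unfold pvInner
  split_ifs with h1 h2 h3
  · rw [pvModify_eq, PySem.Dict.get?_insert_of_ne _ _ hne, pvModify_eq,
      PySem.Dict.get?_insert_of_ne _ _ hne]
  · rw [pvModify_eq, PySem.Dict.get?_insert_of_ne _ _ hne]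
  · rw [pvModify_eq, PySem.Dict.get?_insert_of_ne _ _ hne]
  · rfl

theorem pvInner_fold_keys (sub_x sub_y : String) (ks : List String) :
    ∀ d : PySem.Dict String (Int × Int), (∀ k ∈ ks, k ∈ d.keys) →
      (ks.foldl (pvInner sub_x sub_y) d).keys = d.keys := by
  induction ks with
  | nil => intro d _; rfl
  | cons key rest ih =>
    intro d hin
    simp only [List.foldl_cons]
    have h1 := pvInner_keys sub_x sub_y d key (hin key (by simp))
    rw [ih _ (fun k hk' => by rw [h1]; exact hin k (by simp [hk'])), h1]

theorem pvInner_fold_get? (sub_x sub_y : String) (ks : List String) :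
    ∀ d : PySem.Dict String (Int × Int), ks.Nodup → (∀ k ∈ ks, k ∈ d.keys) → ∀ k,
      (ks.foldl (pvInner sub_x sub_y) d).get? k
        = if k ∈ ks then (d.get? k).map (pvUpd sub_x sub_y k) else d.get? k := by
  induction ks with
  | nil => intro d _ _ k; simp
  | cons key rest ih =>
    intro d hnd hin k
    simp only [List.foldl_cons]
    have hmemkey := hin key (by simp)
    have hkeys1 := pvInner_keys sub_x sub_y d key hmemkey
    have hrest : ∀ k' ∈ rest, k' ∈ (pvInner sub_x sub_y d key).keys := fun k' h' => by
      rw [hkeys1]; exact hin k' (by simp [h'])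
    have hndr : rest.Nodup := (List.nodup_cons.mp hnd).2
    have hknotin : key ∉ rest := (List.nodup_cons.mp hnd).1
    rw [ih _ hndr hrest k]
    by_cases hk : k ∈ rest
    · have hkne : k ≠ key := fun he => hknotin (he ▸ hk)
      rw [pvInner_get?_ne sub_x sub_y d key k hkne]
      simp [hk]
    · by_cases hkk : k = key
      · subst hkk
        rw [pvInner_get?_self sub_x sub_y d k hmemkey]
        simp [hk]
      · rw [pvInner_get?_ne sub_x sub_y d key k hkk]
        simp [hk, hkk]

theorem pvIns2_get? {ν : Type} (d : PySem.Dict String ν) (sx sy : String) (v : ν) (k : String) :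
    (if (if d.contains sx then d else d.insert sx v).contains sy
     then (if d.contains sx then d else d.insert sx v)
     else (if d.contains sx then d else d.insert sx v).insert sy v).get? k
      = if k ∈ d.keys then d.get? k else if k = sx ∨ k = sy then some v else none := by
  have h1g := pvIns1_get? d sx v k
  have h1k := pvIns1_keys d sx v
  rw [pvIns1_get? (if d.contains sx then d else d.insert sx v) sy v k, h1g, h1k]
  by_cases hk : k ∈ d.keys
  · simp [hk, (PySem.Set.mem_add d.keys sx k).mpr (Or.inl hk)]
  · by_cases hsx : k = sx
    · simp [hk, hsx, (PySem.Set.mem_add d.keys sx k).mpr (Or.inr hsx)]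
    · have hnmem : k ∉ PySem.Set.add d.keys sx := fun hmem =>
        ((PySem.Set.mem_add d.keys sx k).mp hmem).elim (fun h => hk h) (fun h => hsx h)
      by_cases hsy : k = sy
      · subst hsy; simp [hk, hsx, hnmem]
      · simp [hk, hsx, hsy, hnmem]

theorem pvIns2_keys {ν : Type} (d : PySem.Dict String ν) (sx sy : String) (v : ν) :
    (if (if d.contains sx then d else d.insert sx v).contains sy
     then (if d.contains sx then d else d.insert sx v)
     else (if d.contains sx then d else d.insert sx v).insert sy v).keys
      = PySem.Set.add (PySem.Set.add d.keys sx) sy := by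
  rw [pvIns1_keys (if d.contains sx then d else d.insert sx v) sy v, pvIns1_keys d sx v]

def pvStepA (x y : String) (kmer : Int) (d : PySem.Dict String (Int × Int)) (i : Int) : PySem.Dict String (Int × Int) :=
  let sub_x := pvSub x kmer i
  let sub_y := pvSub y kmer i
  let d := if (d.get? sub_x).isNone then d.insert sub_x (0, 0) else d
  let d := if (d.get? sub_y).isNone then d.insert sub_y (0, 0) else d
  d.keys.foldl (pvInner sub_x sub_y) d

def pvStepF (x y : String) (kmer : Int) (d : PySem.Dict String Int) (i : Int) : PySem.Dict String Int :=
  let d := if d.contains (pvSub x kmer i) then d else d.insert (pvSub x kmer i) i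
  if d.contains (pvSub y kmer i) then d else d.insert (pvSub y kmer i) i

theorem pvIns1'_eq {ν : Type} (d : PySem.Dict String ν) (sx : String) (v : ν) :
    (if (d.get? sx).isNone then d.insert sx v else d)
      = if d.contains sx then d else d.insert sx v := by
  rw [PySem.Dict.contains_eq_isSome_get?]
  cases h : d.get? sx <;> simp [h]

theorem pvStepF_get? (x y : String) (kmer : Int) (d : PySem.Dict String Int) (i : Int) (k : String) :
    (pvStepF x y kmer d i).get? k
      = (if k ∈ d.keys then d.get? k
         else if k = pvSub x kmer i ∨ k = pvSub y kmer i then some i else none) := by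
  exact pvIns2_get? d (pvSub x kmer i) (pvSub y kmer i) i k

theorem pvStepF_keys (x y : String) (kmer : Int) (d : PySem.Dict String Int) (i : Int) :
    (pvStepF x y kmer d i).keys
      = PySem.Set.add (PySem.Set.add d.keys (pvSub x kmer i)) (pvSub y kmer i) := by
  exact pvIns2_keys d (pvSub x kmer i) (pvSub y kmer i) i

theorem pvStepA_keys (x y : String) (kmer : Int) (d : PySem.Dict String (Int × Int)) (i : Int)
    (hnd : d.keys.Nodup) :
    (pvStepA x y kmer d i).keys
      = PySem.Set.add (PySem.Set.add d.keys (pvSub x kmer i)) (pvSub y kmer i) := by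
  unfold pvStepA
  simp only [pvIns1'_eq]
  rw [pvInner_fold_keys _ _ _ _ (fun k hk => hk)]
  exact pvIns2_keys d (pvSub x kmer i) (pvSub y kmer i) (0, 0)

theorem pvStepA_get? (x y : String) (kmer : Int) (d : PySem.Dict String (Int × Int)) (i : Int)
    (hnd : d.keys.Nodup) (k : String) :
    (pvStepA x y kmer d i).get? k
      = ((if k ∈ d.keys then d.get? k
          else if k = pvSub x kmer i ∨ k = pvSub y kmer i then some (0, 0) else none).map
            (pvUpd (pvSub x kmer i) (pvSub y kmer i) k)) := by
  unfold pvStepA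
  simp only [pvIns1'_eq]
  have hkeys2 := pvIns2_keys d (pvSub x kmer i) (pvSub y kmer i) (0, 0)
  have hnd2 : (if (if d.contains (pvSub x kmer i) then d else d.insert (pvSub x kmer i) (0, 0)).contains (pvSub y kmer i)
      then (if d.contains (pvSub x kmer i) then d else d.insert (pvSub x kmer i) (0, 0))
      else (if d.contains (pvSub x kmer i) then d else d.insert (pvSub x kmer i) (0, 0)).insert (pvSub y kmer i) (0, 0)).keys.Nodup := by
    rw [hkeys2]
    exact PySem.Set.nodup_add _ _ (PySem.Set.nodup_add _ _ hnd)
  rw [pvInner_fold_get? _ _ _ _ hnd2 (fun k hk => hk) k]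
  rw [pvIns2_get? d (pvSub x kmer i) (pvSub y kmer i) (0, 0) k]
  by_cases hk2 : k ∈ (if (if d.contains (pvSub x kmer i) then d else d.insert (pvSub x kmer i) (0, 0)).contains (pvSub y kmer i)
      then (if d.contains (pvSub x kmer i) then d else d.insert (pvSub x kmer i) (0, 0))
      else (if d.contains (pvSub x kmer i) then d else d.insert (pvSub x kmer i) (0, 0)).insert (pvSub y kmer i) (0, 0)).keys
  · rw [if_pos hk2]
  · rw [if_neg hk2]
    rw [hkeys2] at hk2
    have hkk : k ∉ d.keys := fun h => hk2 ((PySem.Set.mem_add _ _ _).mpr (Or.inl ((PySem.Set.mem_add _ _ _).mpr (Or.inl h))))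
    have hkx : k ≠ pvSub x kmer i := fun h => hk2 ((PySem.Set.mem_add _ _ _).mpr (Or.inl ((PySem.Set.mem_add _ _ _).mpr (Or.inr h))))
    have hky : k ≠ pvSub y kmer i := fun h => hk2 ((PySem.Set.mem_add _ _ _).mpr (Or.inr h))
    simp [hkk, hkx, hky]

theorem pyRange_succ_append (j : Nat) :
    PySem.List.pyRange 0 ((j : Int) + 1) = PySem.List.pyRange 0 (j : Int) ++ [(j : Int)] := by
  exact PySem.List.pyRange_one_succ_right (by positivity)

def pvCnt (s k : String) (kmer : Int) (t j : Int) : Int :=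
  ((PySem.List.pyRange t j).countP (fun i => within_gap k (pvSub s kmer i) 5) : Int)

theorem pvCnt_nil (s k : String) (kmer : Int) (a : Int) : pvCnt s k kmer a a = 0 := by
  unfold pvCnt
  rw [PySem.List.pyRange_one_eq_nil (le_refl _)]
  rfl

theorem pvCnt_succ (s k : String) (kmer : Int) (t : Int) (j : Nat) (h0 : t ≤ (j : Int)) :
    pvCnt s k kmer t ((j : Int) + 1)
      = pvCnt s k kmer t (j : Int) + (if within_gap k (pvSub s kmer (j : Int)) 5 then 1 else 0) := by
  unfold pvCnt
  rw [PySem.List.pyRange_one_append t (j : Int) ((j : Int) + 1) h0 (by omega)]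
  have hsing : PySem.List.pyRange (j : Int) ((j : Int) + 1) = [(j : Int)] := by
    rw [PySem.List.pyRange_one_cons (by omega), PySem.List.pyRange_one_eq_nil (le_refl _)]
  rw [hsing, List.countP_append]
  push_cast
  simp [List.countP_cons]

theorem pvMain (x y : String) (kmer : Int) (j : Nat) :
    ((PySem.List.pyRange 0 (j : Int)).foldl (pvStepA x y kmer) PySem.Dict.empty).keys
        = ((PySem.List.pyRange 0 (j : Int)).foldl (pvStepF x y kmer) PySem.Dict.empty).keys
    ∧ ((PySem.List.pyRange 0 (j : Int)).foldl (pvStepF x y kmer) PySem.Dict.empty).keys.Nodup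
    ∧ (∀ k t, ((PySem.List.pyRange 0 (j : Int)).foldl (pvStepF x y kmer) PySem.Dict.empty).get? k = some t → 0 ≤ t ∧ t < (j : Int))
    ∧ (∀ k, ((PySem.List.pyRange 0 (j : Int)).foldl (pvStepA x y kmer) PySem.Dict.empty).get? k
        = (((PySem.List.pyRange 0 (j : Int)).foldl (pvStepF x y kmer) PySem.Dict.empty).get? k).map
            (fun t => (pvCnt x k kmer t (j : Int), pvCnt y k kmer t (j : Int)))) := by
  induction j with
  | zero =>
    rw [Nat.cast_zero, PySem.List.pyRange_one_eq_nil (le_refl 0)]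
    refine ⟨rfl, by simp [PySem.Dict.nodup_keys_empty], ?_, ?_⟩
    · intro k t h
      rw [List.foldl_nil, PySem.Dict.get?_empty] at h
      exact absurd h (by simp)
    · intro k
      simp [PySem.Dict.get?_empty]
  | succ j ih =>
    obtain ⟨h1, h2, h3, h4⟩ := ih
    have hndA : ((PySem.List.pyRange 0 (j : Int)).foldl (pvStepA x y kmer) PySem.Dict.empty).keys.Nodup := by
      rw [h1]; exact h2
    have hc : ((j + 1 : Nat) : Int) = (j : Int) + 1 := by push_cast; ring
    rw [hc, pyRange_succ_append j]
    simp only [List.foldl_append, List.foldl_cons, List.foldl_nil]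
    set dA := (PySem.List.pyRange 0 (j : Int)).foldl (pvStepA x y kmer) PySem.Dict.empty with hdA
    set dF := (PySem.List.pyRange 0 (j : Int)).foldl (pvStepF x y kmer) PySem.Dict.empty with hdF
    refine ⟨?_, ?_, ?_, ?_⟩
    · rw [pvStepA_keys _ _ _ _ _ hndA, pvStepF_keys, h1]
    · rw [pvStepF_keys]
      exact PySem.Set.nodup_add _ _ (PySem.Set.nodup_add _ _ h2)
    · intro k t hkt
      rw [pvStepF_get?] at hkt
      by_cases hk : k ∈ dF.keys
      · rw [if_pos hk] at hkt
        have := h3 k t hkt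
        omega
      · rw [if_neg hk] at hkt
        split_ifs at hkt with hP
        injection hkt with hinj
        omega
    · intro k
      rw [pvStepA_get? _ _ _ _ _ hndA k, pvStepF_get?, h1]
      by_cases hk : k ∈ dF.keys
      · rw [if_pos hk, if_pos hk]
        obtain ⟨t, ht⟩ := pvGet?_isSome dF k hk
        rw [ht, h4 k, ht]
        obtain ⟨h0t, hjt⟩ := h3 k t ht
        have hx := pvCnt_succ x k kmer t j (by omega)
        have hy := pvCnt_succ y k kmer t j (by omega)
        simp only [Option.map_some, pvUpd, hx, hy]
        split_ifs <;> simp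
      · rw [if_neg hk, if_neg hk]
        by_cases hP : k = pvSub x kmer (j : Int) ∨ k = pvSub y kmer (j : Int)
        · rw [if_pos hP, if_pos hP]
          have hx := pvCnt_succ x k kmer (j : Int) j (le_refl _)
          have hy := pvCnt_succ y k kmer (j : Int) j (le_refl _)
          rw [pvCnt_nil] at hx hy
          simp only [Option.map_some, pvUpd, hx, hy]
          split_ifs <;> simp
        · rw [if_neg hP, if_neg hP]
          rfl

-- B's per-key summand, on the concrete substring lists
def pvGB (subs_x subs_y : List String) (key : String) (i : Int) : Int :=
  ((PySem.List.slice subs_x (some i) none).foldl (fun c s => if gap5 (windows5 key) (PySem.Str.len key) s then c + 1 else c) 0)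
  * ((PySem.List.slice subs_y (some i) none).foldl (fun c s => if gap5 (windows5 key) (PySem.Str.len key) s then c + 1 else c) 0)

-- the sum B has accumulated, as a function of the first-appearance dict
def pvSum (subs_x subs_y : List String) (d : PySem.Dict String Int) : Int :=
  d.items.foldl (fun r kv => r + pvGB subs_x subs_y kv.1 kv.2) 0

theorem pvHandle_eq (sx sy : List String) (i : Int) (d : PySem.Dict String Int) (k : String) :
    altHandle sx sy i (d.keys, pvSum sx sy d) k
      = ((if d.contains k then d else d.insert k i).keys,
         pvSum sx sy (if d.contains k then d else d.insert k i)) := by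
  unfold altHandle
  by_cases hk : k ∈ d.keys
  · have hc : d.contains k = true := (pvContains_iff d k).mpr hk
    have hs : PySem.Set.contains d.keys k = true := (PySem.Set.contains_iff _ _).mpr hk
    simp only [hc, hs, if_true]
  · have hc : d.contains k = false := by
      cases h : d.contains k
      · rfl
      · exact absurd ((pvContains_iff d k).mp h) hk
    have hs : PySem.Set.contains d.keys k = false := by
      cases h : PySem.Set.contains d.keys k
      · rfl
      · exact absurd ((PySem.Set.contains_iff _ _).mp h) hk
    have hitems := PySem.Dict.items_insert_of_not_contains d i hc
    have hkeys : (d.insert k i).keys = PySem.Set.add d.keys k := by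
      rw [PySem.Set.add_of_not_mem hk]
      exact PySem.Dict.keys_insert_of_not_contains d i hc
    have hsum : pvSum sx sy (d.insert k i) = pvSum sx sy d + pvGB sx sy k i := by
      unfold pvSum
      rw [hitems, List.foldl_append]
      rfl
    simp only [hc, hs, Bool.false_eq_true, if_false, hkeys, hsum, pvGB]

theorem pvFoldBF (sx sy : List String) (x y : String) (kmer : Int) (is : List Int) :
    ∀ d : PySem.Dict String Int,
      is.foldl (fun st i => altHandle sx sy i (altHandle sx sy i st (pvSub x kmer i)) (pvSub y kmer i))
        (d.keys, pvSum sx sy d)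
      = ((is.foldl (pvStepF x y kmer) d).keys, pvSum sx sy (is.foldl (pvStepF x y kmer) d)) := by
  induction is with
  | nil => intro d; simp
  | cons i rest ih =>
    intro d
    simp only [List.foldl_cons]
    rw [pvHandle_eq sx sy i d (pvSub x kmer i),
      pvHandle_eq sx sy i _ (pvSub y kmer i)]
    exact ih _

theorem pvEnumMap {α : Type} (h : Int → α) (j : Nat) : ∀ s : Nat,
    PySem.List.enumerate ((PySem.List.pyRange (s : Int) ((s : Int) + (j : Int))).map h) (s : Int)
      = (PySem.List.pyRange (s : Int) ((s : Int) + (j : Int))).map (fun i => (i, h i)) := by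
  induction j with
  | zero =>
    intro s
    rw [Nat.cast_zero, add_zero, PySem.List.pyRange_one_eq_nil (le_refl _)]
    rfl
  | succ j ih =>
    intro s
    rw [show ((j + 1 : Nat) : Int) = (j : Int) + 1 by push_cast; ring]
    rw [PySem.List.pyRange_one_cons (by omega : (s : Int) < (s : Int) + ((j : Int) + 1))]
    simp only [List.map_cons]
    rw [PySem.List.enumerate_cons]
    have hrange : PySem.List.pyRange ((s : Int) + 1) ((s : Int) + ((j : Int) + 1))
        = PySem.List.pyRange (((s + 1 : Nat)) : Int) ((((s + 1 : Nat)) : Int) + (j : Int)) := by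
      push_cast
      ring_nf
    have hs1 : (s : Int) + 1 = ((s + 1 : Nat) : Int) := by push_cast; ring
    rw [hrange, hs1, ih (s + 1)]

-- B's suffix count over subs_s equals the index count pvCnt
theorem pvCntSlice (s : String) (k : String) (kmer n t : Int) (h0 : 0 ≤ t) (h1 : t ≤ n) :
    (PySem.List.slice ((PySem.List.pyRange 0 n).map (pvSub s kmer)) (some t) none).foldl
        (fun c str => if gap5 (windows5 k) (PySem.Str.len k) str then c + 1 else c) 0
      = pvCnt s k kmer t n := by
  rw [PySem.List.slice_from _ h0]
  rw [PySem.List.pyRange_one_append 0 t n h0 h1, List.map_append]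
  rw [show t.toNat = ((PySem.List.pyRange 0 t).map (pvSub s kmer)).length by
    simp [PySem.List.length_pyRange_one]]
  rw [List.drop_left, List.foldl_map]
  rw [PySem.List.foldl_congr_mem _ _
      (fun c i => if within_gap k (pvSub s kmer i) 5 then c + 1 else c) 0 ?_]
  · rw [PySem.List.foldl_if_add_one]
    unfold pvCnt
    ring
  · intro acc i _
    rw [show gap5 (windows5 k) (PySem.Str.len k) (pvSub s kmer i) = within_gap k (pvSub s kmer i) 5
      from (pvGapEq k (pvSub s kmer i)).symm]

-- ===== VERDICT (by name: the statement is the Claim_ definition above) =====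
theorem substring_kernel_spec : Claim_equal_substring_kernel := by
  intro x y kmer m _
  unfold Spec_substring_kernel
  have hA : substring_kernel x y kmer m
      = ((PySem.List.pyRange 0 (PySem.Str.len x - kmer)).foldl (pvStepA x y kmer) PySem.Dict.empty).items.foldl
          (fun res kv => res + kv.2.1 * kv.2.2) 0 := rfl
  have hB : substring_kernel_alt x y kmer m
      = ((PySem.List.enumerate (List.zip ((PySem.List.pyRange 0 (PySem.Str.len x - kmer)).map (pvSub x kmer)) ((PySem.List.pyRange 0 (PySem.Str.len x - kmer)).map (pvSub y kmer)))).foldl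
          (fun st p => altHandle ((PySem.List.pyRange 0 (PySem.Str.len x - kmer)).map (pvSub x kmer)) ((PySem.List.pyRange 0 (PySem.Str.len x - kmer)).map (pvSub y kmer)) p.1
            (altHandle ((PySem.List.pyRange 0 (PySem.Str.len x - kmer)).map (pvSub x kmer)) ((PySem.List.pyRange 0 (PySem.Str.len x - kmer)).map (pvSub y kmer)) p.1 st p.2.1) p.2.2)
          (PySem.Set.ofList [], 0)).2 := rfl
  rw [hA, hB]
  set n := PySem.Str.len x - kmer with hn
  by_cases h0n : 0 ≤ n
  · rw [show n = ((n.toNat : Nat) : Int) from (Int.toNat_of_nonneg h0n).symm]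
    set sxl := (PySem.List.pyRange 0 ((n.toNat : Nat) : Int)).map (pvSub x kmer) with hsxl
    set syl := (PySem.List.pyRange 0 ((n.toNat : Nat) : Int)).map (pvSub y kmer) with hsyl
    have hzip : sxl.zip syl
        = (PySem.List.pyRange 0 ((n.toNat : Nat) : Int)).map (fun i => (pvSub x kmer i, pvSub y kmer i)) := by
      rw [hsxl, hsyl, List.zip_map']
    have henum : PySem.List.enumerate (sxl.zip syl)
        = (PySem.List.pyRange 0 ((n.toNat : Nat) : Int)).map (fun i => (i, (pvSub x kmer i, pvSub y kmer i))) := by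
      rw [hzip]
      have := pvEnumMap (fun i => (pvSub x kmer i, pvSub y kmer i)) n.toNat 0
      simpa using this
    rw [henum, List.foldl_map]
    have hinit : ((PySem.Set.ofList [] : PySem.Set String), (0 : Int))
        = ((PySem.Dict.empty : PySem.Dict String Int).keys, pvSum sxl syl PySem.Dict.empty) := rfl
    rw [hinit, pvFoldBF sxl syl x y kmer]
    obtain ⟨h1, h2, h3, h4⟩ := pvMain x y kmer n.toNat
    unfold pvSum
    rw [PySem.Dict.items_eq_map_keys _ (h1 ▸ h2) ((0 : Int), (0 : Int)),
      PySem.Dict.items_eq_map_keys _ h2 (0 : Int), List.foldl_map, List.foldl_map, h1]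
    apply PySem.List.foldl_congr_mem
    intro acc k hk
    obtain ⟨t, ht⟩ := pvGet?_isSome _ k hk
    obtain ⟨h0t, htN⟩ := h3 k t ht
    have hgetF : ((PySem.List.pyRange 0 ((n.toNat : Nat) : Int)).foldl (pvStepF x y kmer) PySem.Dict.empty).getD k 0 = t := by
      show (((PySem.List.pyRange 0 ((n.toNat : Nat) : Int)).foldl (pvStepF x y kmer) PySem.Dict.empty).get? k).getD 0 = t
      rw [ht]
      rfl
    have hgetA : ((PySem.List.pyRange 0 ((n.toNat : Nat) : Int)).foldl (pvStepA x y kmer) PySem.Dict.empty).getD k ((0 : Int), (0 : Int))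
        = (pvCnt x k kmer t ((n.toNat : Nat) : Int), pvCnt y k kmer t ((n.toNat : Nat) : Int)) := by
      show (((PySem.List.pyRange 0 ((n.toNat : Nat) : Int)).foldl (pvStepA x y kmer) PySem.Dict.empty).get? k).getD ((0 : Int), (0 : Int)) = _
      rw [h4 k, ht]
      rfl
    simp only [hgetA, hgetF]
    rw [pvGB, hsxl, hsyl,
      pvCntSlice x k kmer ((n.toNat : Nat) : Int) t h0t (by omega),
      pvCntSlice y k kmer ((n.toNat : Nat) : Int) t h0t (by omega)]
  · rw [PySem.List.pyRange_one_eq_nil (by omega : n ≤ 0)]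
    rfl
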